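-- pv_equiv track=rewrite | github.com/sarowlwp/study-class | app/scripts/pdf_to_characters.py | _normalize_pinyin
-- ===== SOURCE A (Python) =====
-- def _normalize_pinyin(pinyin: str) -> str:
--     """规范化拼音（简单处理）"""
--     if not pinyin:
--         return pinyin
--
--     direct_map = {
--         'U': 'ī', 'T': 'ō', 'A': 'ā', 'N': 'n', 'G': 'g',
--         'P': 'ú', 'W': 'á', 'Q': 'ā',
--         'L': 'ǐ', 'O': 'ǎo', 'E': 'ě',
--         'K': 'ì',
--     }
--
--     result = []
--     i = 0
--     n = len(pinyin)
--
--     while i < n: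
--         char = pinyin[i]
--
--         if char in direct_map:
--             if char == 'L' and result and result[-1] == 'i':
--                 result[-1] = 'ǐ'
--             else:
--                 result.append(direct_map[char])
--             i += 1
--         elif char.isupper():
--             result.append(char.lower())
--             i += 1
--         else:
--             result.append(char)
--             i += 1
--
--     return ''.join(result)
-- ===== SOURCE B (Python) =====
-- _KEYS = 'UTANGPWQLOEK'
-- _VALS = ('ī', 'ō', 'ā', 'n', 'g', 'ú', 'á', 'ā', 'ǐ', 'ǎo', 'ě', 'ì')
--
--
-- def _map_char(c):
--     for k, v in zip(_KEYS, _VALS):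
--         if k == c:
--             return v
--     return c.lower() if c.isupper() else c
--
--
-- def _normalize_pinyin(pinyin: str) -> str:
--     """Normalize pinyin: lookahead pairwise scan instead of lookback mutation."""
--     if not pinyin:
--         return pinyin
--
--     parts = []
--     i = 0
--     n = len(pinyin)
--     while i < n:
--         c = pinyin[i]
--         if c in 'iI' and i + 1 < n and pinyin[i + 1] == 'L':
--             parts.append('ǐ')
--             i += 2
--         else:
--             parts.append(_map_char(c))
--             i += 1
--     return ''.join(parts)
-- ===== Notes on version B (the rewrite author's own statement) =====
-- stated objective: alternative
-- what changed: A's stateful lookback loop (a result list whose last element is mutated when the context-sensitive key arrives right after the plain vowel) is replaced by a lookahead pairwise scan that consumes the vowel together with the following key in one step, with the per-character map done by an early-return scan over a key/value table instead of a dict.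
import Mathlib
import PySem

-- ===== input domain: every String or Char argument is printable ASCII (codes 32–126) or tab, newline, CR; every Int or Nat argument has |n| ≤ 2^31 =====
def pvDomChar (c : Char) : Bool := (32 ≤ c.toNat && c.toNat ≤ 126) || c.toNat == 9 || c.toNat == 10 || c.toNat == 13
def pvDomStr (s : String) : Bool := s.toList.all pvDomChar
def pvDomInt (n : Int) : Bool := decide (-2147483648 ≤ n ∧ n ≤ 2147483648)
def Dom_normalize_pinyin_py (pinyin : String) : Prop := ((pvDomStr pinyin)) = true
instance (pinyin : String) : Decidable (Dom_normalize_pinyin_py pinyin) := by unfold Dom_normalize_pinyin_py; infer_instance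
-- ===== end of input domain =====

-- B replaces A's stateful lookback loop (which mutates the last emitted token when the
-- context-sensitive key follows it) by a lookahead pairwise scan with a key/value-table
-- character map (objective: alternative decomposition, same O(n) cost).

-- ===== PORT A =====
-- the dict literal `direct_map` of A
def pyDirectMapA : PySem.Dict Char String :=
  PySem.Dict.mk [('U', "ī"), ('T', "ō"), ('A', "ā"), ('N', "n"), ('G', "g"),
                 ('P', "ú"), ('W', "á"), ('Q', "ā"),
                 ('L', "ǐ"), ('O', "ǎo"), ('E', "ě"),
                 ('K', "ì")]

-- the `while i < n` loop of A, one step per character, `result` kept in append order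
def pyNormLoopA : List Char → List String → List String
  | [], result => result
  | c :: rest, result =>
    if pyDirectMapA.contains c then
      if c == 'L' && !result.isEmpty && result.getLast? == some "i" then
        pyNormLoopA rest (result.dropLast ++ ["ǐ"])        -- result[-1] = 'ǐ'
      else
        pyNormLoopA rest (result ++ [pyDirectMapA.getD c ""])  -- lookup guarded by `char in direct_map`
    else if PySem.Chars.isupper c then
      pyNormLoopA rest (result ++ [(PySem.Chars.lowerChar c).toString])
    else
      pyNormLoopA rest (result ++ [c.toString])

def normalize_pinyin_py (pinyin : String) : String :=
  if pinyin == "" then pinyin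
  else PySem.Str.join "" (pyNormLoopA pinyin.toList [])

-- ===== PORT B =====
-- `_KEYS`, `_VALS` and `zip(_KEYS, _VALS)` of Source B
def pyKeysB : List Char := "UTANGPWQLOEK".toList
def pyValsB : List String := ["ī", "ō", "ā", "n", "g", "ú", "á", "ā", "ǐ", "ǎo", "ě", "ì"]
def pyRulesB : List (Char × String) := pyKeysB.zip pyValsB

-- the `for k, v in zip(...)`/early-return scan inside `_map_char`
def pyScanB : List (Char × String) → Char → Option String
  | [], _ => none
  | (k, v) :: rules, c => if k == c then some v else pyScanB rules c

def mapCharB (c : Char) : String :=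
  (pyScanB pyRulesB c).getD
    (if PySem.Chars.isupper c then (PySem.Chars.lowerChar c).toString else c.toString)

-- the lookahead `while` loop of B; `c in 'iI'` on the single char c is c == 'i' || c == 'I'
def pyNormLoopB : List Char → List String
  | [] => []
  | c :: rest =>
    if (c == 'i' || c == 'I') && rest.head? == some 'L' then
      "ǐ" :: pyNormLoopB rest.tail          -- parts.append('ǐ'); i += 2
    else
      mapCharB c :: pyNormLoopB rest        -- parts.append(_map_char(c)); i += 1
  termination_by cs => cs.length
  decreasing_by all_goals (simp; try omega)

def normalize_pinyin_py_alt (pinyin : String) : String :=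
  if pinyin == "" then pinyin
  else PySem.Str.join "" (pyNormLoopB pinyin.toList)

-- ===== PRECONDITION & SPEC =====
def Spec_normalize_pinyin_py (pinyin : String) (out : String) : Prop := out = normalize_pinyin_py_alt pinyin
instance (pinyin : String) (out : String) : Decidable (Spec_normalize_pinyin_py pinyin out) := by unfold Spec_normalize_pinyin_py; infer_instance

-- ===== CLAIM (what is proved, stated in full; the proofs are below) =====
def Claim_equal_normalize_pinyin_py : Prop := ∀ (pinyin : String), Dom_normalize_pinyin_py pinyin → Spec_normalize_pinyin_py pinyin (normalize_pinyin_py pinyin)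

-- ===== LEMMAS AND PROOFS =====

-- characters of a list of strings, in order (= join with the empty separator)
def lchars (l : List String) : List Char := (l.map String.toList).flatten

lemma lchars_append (l₁ l₂ : List String) : lchars (l₁ ++ l₂) = lchars l₁ ++ lchars l₂ := by
  simp [lchars]

lemma char_toNat_inj {c d : Char} (h : c.toNat = d.toNat) : c = d := by
  unfold Char.toNat at h; exact Char.ext (UInt32.toNat_inj.mp h)

lemma char_toNat_ofNat {n : Nat} (h : n < 55296) : (Char.ofNat n).toNat = n := by
  unfold Char.ofNat
  split
  · rfl
  · rename_i hv; exact absurd (Or.inl h) hv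

-- A's per-char token (contains/getD branch) equals B's `_map_char`
lemma tokA_eq (c : Char) :
    (if pyDirectMapA.contains c then pyDirectMapA.getD c ""
     else if PySem.Chars.isupper c then (PySem.Chars.lowerChar c).toString
     else c.toString) = mapCharB c := by
  by_cases hm : pyDirectMapA.contains c = true
  · have hk : c = 'U' ∨ c = 'T' ∨ c = 'A' ∨ c = 'N' ∨ c = 'G' ∨ c = 'P' ∨ c = 'W' ∨
        c = 'Q' ∨ c = 'L' ∨ c = 'O' ∨ c = 'E' ∨ c = 'K' := by
      simp [pyDirectMapA, PySem.Dict.contains] at hm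
      rcases hm with h|h|h|h|h|h|h|h|h|h|h|h <;> simp [h.symm]
    rcases hk with rfl|rfl|rfl|rfl|rfl|rfl|rfl|rfl|rfl|rfl|rfl|rfl <;> decide
  · have hne : ¬(c = 'U' ∨ c = 'T' ∨ c = 'A' ∨ c = 'N' ∨ c = 'G' ∨ c = 'P' ∨ c = 'W' ∨
        c = 'Q' ∨ c = 'L' ∨ c = 'O' ∨ c = 'E' ∨ c = 'K') := by
      intro h
      apply hm
      rcases h with rfl|rfl|rfl|rfl|rfl|rfl|rfl|rfl|rfl|rfl|rfl|rfl <;> decide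
    push Not at hne
    obtain ⟨h1, h2, h3, h4, h5, h6, h7, h8, h9, h10, h11, h12⟩ := hne
    have hscan : pyScanB pyRulesB c = none := by
      simp [pyRulesB, pyKeysB, pyValsB, pyScanB,
        Ne.symm h1, Ne.symm h2, Ne.symm h3, Ne.symm h4, Ne.symm h5, Ne.symm h6,
        Ne.symm h7, Ne.symm h8, Ne.symm h9, Ne.symm h10, Ne.symm h11, Ne.symm h12]
    simp [hm, mapCharB, hscan]

-- a hit of B's scan produces one of the table values
lemma scan_mem {rules : List (Char × String)} {c : Char} {v : String}
    (h : pyScanB rules c = some v) : v ∈ rules.map Prod.snd := by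
  induction rules with
  | nil => simp [pyScanB] at h
  | cons kv rest ih =>
    obtain ⟨k, w⟩ := kv
    by_cases hk : (k == c) = true
    · simp [pyScanB, hk] at h
      simp [h]
    · simp [pyScanB, hk] at h
      simp [ih h]

-- on domain characters, `_map_char` returns "i" only for input 'i' or 'I'
lemma mapCharB_i (c : Char) (h : mapCharB c = "i") :
    c = 'i' ∨ c = 'I' := by
  unfold mapCharB at h
  cases hscan : pyScanB pyRulesB c with
  | some v =>
    rw [hscan] at h
    simp only [Option.getD_some] at h
    exact absurd (h ▸ scan_mem hscan) (by decide)
  | none =>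
    rw [hscan] at h
    simp only [Option.getD_none] at h
    by_cases hu : PySem.Chars.isupper c = true
    · rw [if_pos hu] at h
      have hb : 65 ≤ c.toNat ∧ c.toNat ≤ 90 := by
        simp only [PySem.Chars.isupper, Bool.and_eq_true, decide_eq_true_eq] at hu
        obtain ⟨hl, hr⟩ := hu
        rw [Char.le_def] at hl hr
        unfold Char.toNat
        exact ⟨UInt32.le_iff_toNat_le.mp hl, UInt32.le_iff_toNat_le.mp hr⟩
      have hval : (PySem.Chars.lowerChar c).toNat = c.toNat + 32 := by
        simp [PySem.Chars.lowerChar, hu]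
        exact char_toNat_ofNat (by omega)
      right
      apply char_toNat_inj
      have hl : PySem.Chars.lowerChar c = 'i' := by
        have : ((PySem.Chars.lowerChar c).toString).toList = ("i" : String).toList := by rw [h]
        simpa using this
      rw [hl] at hval
      have hi : ('i' : Char).toNat = 105 := by decide
      have hI : ('I' : Char).toNat = 73 := by decide
      omega
    · rw [if_neg hu] at h
      left
      have : (c.toString).toList = ("i" : String).toList := by rw [h]
      simpa using this

-- one non-merging step of A's loop appends B's per-char token
lemma stepA (c : Char) (rest : List Char) (acc : List String)
    (h : acc.getLast? = some "i" → c ≠ 'L') :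
    pyNormLoopA (c :: rest) acc = pyNormLoopA rest (acc ++ [mapCharB c]) := by
  rw [← tokA_eq c]
  by_cases hm : pyDirectMapA.contains c = true
  · have hcond : (c == 'L' && !acc.isEmpty && acc.getLast? == some "i") = false := by
      cases hg : acc.getLast? with
      | none => simp
      | some v =>
        by_cases hv : v = "i"
        · subst hv
          have := h hg
          simp [this]
        · simp [hv]
    simp [pyNormLoopA, hm, hcond]
  · simp [pyNormLoopA, hm]
    split <;> rfl

-- the merging step of A's loop on 'L' after an emitted "i"
lemma stepA_merge (rest : List Char) (acc : List String) (h : acc.getLast? = some "i") :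
    pyNormLoopA ('L' :: rest) acc = pyNormLoopA rest (acc.dropLast ++ ["ǐ"]) := by
  have hne : acc.isEmpty = false := by
    cases acc with
    | nil => simp at h
    | cons a l => rfl
  simp [pyNormLoopA, show pyDirectMapA.contains 'L' = true from by decide, hne, h]

-- A's loop, joined, computes B's lookahead loop, joined
lemma lemA : ∀ (n : Nat) (cs : List Char) (acc : List String), cs.length ≤ n →
    (∀ c ∈ cs, pvDomChar c = true) →
    (acc.getLast? = some "i" → cs.head? ≠ some 'L') →
    lchars (pyNormLoopA cs acc) = lchars acc ++ lchars (pyNormLoopB cs) := by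
  intro n
  induction n with
  | zero =>
    intro cs acc hlen _ _
    have : cs = [] := List.eq_nil_of_length_eq_zero (Nat.le_zero.mp hlen)
    subst this
    simp [pyNormLoopA, pyNormLoopB, lchars]
  | succ n ih =>
    intro cs acc hlen hdom hlast
    cases cs with
    | nil => simp [pyNormLoopA, pyNormLoopB, lchars]
    | cons c rest =>
      have hdc : pvDomChar c = true := hdom c (by simp)
      have hdrest : ∀ c ∈ rest, pvDomChar c = true := fun d hd => hdom d (by simp [hd])
      by_cases hmerge : (c = 'i' ∨ c = 'I') ∧ rest.head? = some 'L'
      · -- merge: c ∈ {i, I} and next char is 'L'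
        obtain ⟨hci, hrl⟩ := hmerge
        obtain ⟨rest', rfl⟩ : ∃ rest', rest = 'L' :: rest' := by
          cases rest with
          | nil => simp at hrl
          | cons e r => simp at hrl; exact ⟨r, by rw [hrl]⟩
        have htok : mapCharB c = "i" := by
          rcases hci with rfl | rfl <;> decide
        rw [stepA c _ acc (fun _ => by rcases hci with rfl | rfl <;> decide), htok,
            stepA_merge _ _ (by simp), List.dropLast_concat,
            ih rest' (acc ++ ["ǐ"]) (by simp at hlen ⊢; omega) (fun d hd => hdrest d (by simp [hd]))
              (by intro hcontr; simp at hcontr)]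
        have hb : pyNormLoopB (c :: 'L' :: rest') = "ǐ" :: pyNormLoopB rest' := by
          rw [pyNormLoopB]
          rcases hci with rfl | rfl <;> simp
        rw [hb, lchars_append]
        simp [lchars]
      · -- no merge: one stepA, token is mapCharB c
        have hcl : acc.getLast? = some "i" → c ≠ 'L' := by
          intro hg
          have := hlast hg
          simp at this
          exact this
        rw [stepA c rest acc hcl]
        have hnext : (acc ++ [mapCharB c]).getLast? = some "i" → rest.head? ≠ some 'L' := by
          intro hg hrl
          rw [List.getLast?_concat] at hg
          have htok : mapCharB c = "i" := by injection hg
          exact hmerge ⟨mapCharB_i c htok, hrl⟩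
        rw [ih rest (acc ++ [mapCharB c]) (by simp at hlen ⊢; omega) hdrest hnext]
        have hb : pyNormLoopB (c :: rest) = mapCharB c :: pyNormLoopB rest := by
          rw [pyNormLoopB]
          have hcond : ((c == 'i' || c == 'I') && rest.head? == some 'L') = false := by
            by_cases hh : rest.head? = some 'L'
            · have hci : ¬(c = 'i' ∨ c = 'I') := fun hc => hmerge ⟨hc, hh⟩
              push Not at hci
              simp [hci.1, hci.2]
            · simp [hh]
          rw [hcond]
          simp
        rw [hb, lchars_append]
        simp [lchars]

-- joining with the empty separator is flattening
lemma join_nil_flatten (xss : List (List Char)) : PySem.Chars.join [] xss = xss.flatten := by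
  induction xss with
  | nil => rfl
  | cons x xs ih =>
    cases xs with
    | nil => simp [PySem.Chars.join, List.intercalate]
    | cons y ys =>
      rw [PySem.Chars.join_cons_cons, List.flatten_cons, ← ih]
      simp

-- ===== VERDICT (by name: the statement is the Claim_ definition above) =====
theorem normalize_pinyin_py_spec : Claim_equal_normalize_pinyin_py := by
  intro s hdom
  unfold Spec_normalize_pinyin_py
  have hdom' : ∀ c ∈ s.toList, pvDomChar c = true := by
    intro c hc
    exact List.all_eq_true.mp hdom c hc
  by_cases hs : s = ""
  · simp [normalize_pinyin_py, normalize_pinyin_py_alt, hs]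
  · have hne : (s == "") = false := by simp [hs]
    rw [normalize_pinyin_py, normalize_pinyin_py_alt, hne]
    simp only [Bool.false_eq_true, if_false]
    simp only [PySem.Str.join, show ("" : String).toList = ([] : List Char) from rfl]
    rw [join_nil_flatten, join_nil_flatten]
    have := lemA s.toList.length s.toList [] le_rfl hdom' (by simp)
    exact congrArg String.ofList (by simpa [lchars] using this)
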